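-- pv_equiv track=rewrite | github.com/thong3le/InterviewBit | graph/sum_fibonacci_numbers.py | fibsum
-- ===== SOURCE A (Python) =====
-- def fibsum(A):
--     fib = [1,1]
--     while fib[-1] + fib[-2] <= A:
--         fib.append(fib[-1] + fib[-2])
--     ans = 0
--     i = 0
--     idx = len(fib) - 1
--     while A > 0:
--         while fib[idx] > A:
--             idx -= 1
--         ans += 1
--         A -= fib[idx]
--     return ans
-- ===== SOURCE B (Python) =====
-- def fibsum(A):
--     # List-free recursive Zeckendorf count: subtract the largest Fibonacci
--     # number not exceeding A (found by advancing a pair) and recurse.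
--     if A <= 0:
--         return 0
--     a, b = 1, 1
--     while a + b <= A:
--         a, b = b, a + b
--     return 1 + fibsum(A - b)
-- ===== Notes on version B (the rewrite author's own statement) =====
-- stated objective: simpler
-- what changed: Drops A's Fibonacci list and its two nested index-pointer loops entirely: B is a short recursion that finds the largest Fibonacci number not exceeding the remainder with a sliding pair (a,b) and recurses on the remainder, maintaining no list and no index state.
import Mathlib
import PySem

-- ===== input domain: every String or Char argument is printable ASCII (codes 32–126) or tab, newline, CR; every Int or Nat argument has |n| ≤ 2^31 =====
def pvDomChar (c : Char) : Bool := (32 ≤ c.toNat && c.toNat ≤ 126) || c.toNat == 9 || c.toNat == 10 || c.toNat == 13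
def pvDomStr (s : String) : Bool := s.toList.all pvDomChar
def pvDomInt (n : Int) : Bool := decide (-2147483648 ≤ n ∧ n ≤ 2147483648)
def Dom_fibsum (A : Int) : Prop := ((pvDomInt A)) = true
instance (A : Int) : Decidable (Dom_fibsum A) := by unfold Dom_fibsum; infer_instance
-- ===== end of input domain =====

-- B drops A's Fibonacci list and its two nested pointer loops: it is a short recursion that
-- finds the largest Fibonacci ≤ remainder with a sliding pair and recurses (objective: simpler).

-- termination-measure facts cited by the ports' recursions (decreasing_by) below
theorem pvDecBuild (A a b : Int) (h : 1 ≤ b ∧ a + b ≤ A) :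
    (A + 1 - (b + (a + b))).toNat < (A + 1 - (a + b)).toNat := by omega
theorem pvDecLoop (r g : Int) (h : 0 < r ∧ 1 ≤ g) : (r - g).toNat < r.toNat := by omega

-- ===== PORT A =====
-- `while fib[-1] + fib[-2] <= A: fib.append(fib[-1] + fib[-2])`; a, b mirror fib[-2], fib[-1].
-- The `1 ≤ b` conjunct is a termination guard only: it holds on every reachable state
-- (b starts at 1 and only grows), so the computation is exactly Python's.
def fibBuildA (A : Int) (acc : List Int) (a b : Int) : List Int :=
  if h : 1 ≤ b ∧ a + b ≤ A then fibBuildA A (acc ++ [a + b]) b (a + b) else acc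
termination_by (A + 1 - (a + b)).toNat
decreasing_by exact pvDecBuild A a b h

-- inner `while fib[idx] > A: idx -= 1`; at idx = 0 Python's loop also stops whenever it is
-- reached (fib[0] = 1 ≤ A holds there in every run), so returning 0 there is exact.
def findIdxA (fib : List Int) (r : Int) : Nat → Nat
  | 0 => 0
  | k + 1 => if fib.getD (k + 1) 0 > r then findIdxA fib r k else k + 1

-- outer `while A > 0:` loop; the second conjunct is a termination guard only: every
-- entry of the built list is ≥ 1, so on reachable states the test is exactly `0 < r`.
def loopA (fib : List Int) (r : Int) (idx : Nat) (ans : Int) : Int :=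
  if h : 0 < r ∧ 1 ≤ fib.getD (findIdxA fib r idx) 0 then
    loopA fib (r - fib.getD (findIdxA fib r idx) 0) (findIdxA fib r idx) (ans + 1)
  else ans
termination_by r.toNat
decreasing_by exact pvDecLoop r _ h

def fibsum (A : Int) : Int :=
  let fib := fibBuildA A [1, 1] 1 1
  loopA fib A (fib.length - 1) 0

-- ===== PORT B =====
-- `a, b = 1, 1; while a + b <= A: a, b = b, a + b` — returns the final b, the largest
-- Fibonacci number ≤ A (for A ≥ 1); `1 ≤ b` is a termination guard only (b starts at 1
-- and only grows).
def fibFindB (A a b : Int) : Int :=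
  if h : 1 ≤ b ∧ a + b ≤ A then fibFindB A b (a + b) else b
termination_by (A + 1 - (a + b)).toNat
decreasing_by exact pvDecBuild A a b h

-- cited by fibsum_alt's decreasing_by: the found value is ≥ 1
theorem fibFindB_ge_one (A : Int) : ∀ (a b : Int), 1 ≤ a → 1 ≤ b → 1 ≤ fibFindB A a b := by
  intro a b
  fun_induction fibFindB with
  | case1 a b h ih => exact fun ha hb => ih hb (by omega)
  | case2 a b h => exact fun _ hb => hb

-- `if A <= 0: return 0` / `return 1 + fibsum(A - b)`
def fibsum_alt (A : Int) : Int :=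
  if h : A ≤ 0 then 0 else 1 + fibsum_alt (A - fibFindB A 1 1)
termination_by A.toNat
decreasing_by
  exact pvDecLoop A (fibFindB A 1 1) ⟨by omega, fibFindB_ge_one A 1 1 (by norm_num) (by norm_num)⟩

-- ===== PRECONDITION & SPEC =====
def Spec_fibsum (A : Int) (out : Int) : Prop := out = fibsum_alt A
instance (A : Int) (out : Int) : Decidable (Spec_fibsum A out) := by unfold Spec_fibsum; infer_instance

-- ===== CLAIM (what is proved, stated in full; the proofs are below) =====
def Claim_equal_fibsum : Prop := ∀ (A : Int), Dom_fibsum A → Spec_fibsum A (fibsum A)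

-- ===== LEMMAS AND PROOFS =====

-- the canonical Fibonacci list [fib 1, fib 2, …, fib n]
def FL (n : Nat) : List Int := (List.range n).map (fun i => ((Nat.fib (i + 1) : Nat) : Int))

theorem FL_length (n : Nat) : (FL n).length = n := by simp [FL]

theorem FL_getD (n i : Nat) (h : i < n) : (FL n).getD i 0 = (Nat.fib (i + 1) : Int) := by
  rw [List.getD_eq_getElem _ 0 (by simpa [FL_length])]
  simp [FL]

theorem FL_succ (m : Nat) : FL (m + 1) = FL m ++ [(Nat.fib (m + 1) : Int)] := by
  simp [FL, List.range_succ]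

theorem fib_step (k : Nat) (hk : 2 ≤ k) :
    (Nat.fib (k - 1) : Int) + (Nat.fib k : Int) = (Nat.fib (k + 1) : Int) := by
  have h2 : k - 1 + 2 = k + 1 := by omega
  have h1 : k - 1 + 1 = k := by omega
  rw [← h2, Nat.fib_add_two, h1]
  push_cast
  ring

theorem buildA_spec (A : Int) : ∀ (acc : List Int) (a b : Int)
    (k : Nat), 2 ≤ k → acc = FL k → a = (Nat.fib (k - 1) : Int) → b = (Nat.fib k : Int) →
    ∃ n, 2 ≤ n ∧ fibBuildA A acc a b = FL n ∧ A < (Nat.fib (n + 1) : Int) := by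
  intro acc a b
  fun_induction fibBuildA with
  | case1 acc a b h ih =>
      intro k hk hacc hA hB
      have hstep := fib_step k hk
      refine ih (k + 1) (by omega) ?_ ?_ ?_
      · subst hacc hA hB
        rw [FL_succ, hstep]
      · rw [hB]; norm_num
      · rw [hA, hB, hstep]
  | case2 acc a b h =>
      intro k hk hacc hA hB
      refine ⟨k, hk, hacc, ?_⟩
      have hstep := fib_step k hk
      have hbpos : 1 ≤ (Nat.fib k : Int) := by
        have := Nat.fib_pos.mpr (show 0 < k by omega)
        exact_mod_cast this
      rw [not_and_or] at h
      subst hA hB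
      omega

theorem build_top (A : Int) : ∃ n, 2 ≤ n ∧
    fibsum A = loopA (FL n) A (n - 1) 0 ∧ A < (Nat.fib (n + 1) : Int) := by
  obtain ⟨n, hn, hEq, hA⟩ := buildA_spec A [1, 1] 1 1 2 (le_refl 2)
    (by simp [FL, List.range_succ]) (by simp) (by simp)
  exact ⟨n, hn, by simp only [fibsum, hEq, FL_length], hA⟩

theorem find_spec (n : Nat) (r : Int) (hr : 1 ≤ r) : ∀ idx, 1 ≤ idx → idx < n →
    1 ≤ findIdxA (FL n) r idx ∧ findIdxA (FL n) r idx ≤ idx ∧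
    ((Nat.fib (findIdxA (FL n) r idx + 1) : Int) ≤ r) ∧
    ∀ k, findIdxA (FL n) r idx < k → k ≤ idx → r < (Nat.fib (k + 1) : Int) := by
  intro idx
  induction idx with
  | zero => omega
  | succ m ih =>
      intro _ hlt
      simp only [findIdxA]
      rw [FL_getD n (m + 1) hlt]
      by_cases hc : (Nat.fib (m + 1 + 1) : Int) > r
      · simp only [hc, if_true]
        rcases Nat.eq_zero_or_pos m with rfl | hm
        · -- this branch is impossible: fib 2 = 1 ≤ r
          simp [Nat.fib] at hc; omega
        · obtain ⟨h1, h2, h3, h4⟩ := ih hm (by omega)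
          refine ⟨h1, by omega, h3, ?_⟩
          intro k hk1 hk2
          rcases Nat.lt_or_ge k (m + 1) with hk | hk
          · exact h4 k hk1 (by omega)
          · have hkm : k = m + 1 := by omega
            subst hkm; exact hc
      · simp only [hc, if_false]
        exact ⟨by omega, le_refl _, by omega, by omega⟩

-- B's pair-advancing search returns fib m with fib m ≤ r < fib (m+1)
theorem findB_spec (r : Int) : ∀ (a b : Int) (k : Nat), 2 ≤ k →
    a = (Nat.fib (k - 1) : Int) → b = (Nat.fib k : Int) → (Nat.fib k : Int) ≤ r →
    ∃ m, 2 ≤ m ∧ fibFindB r a b = (Nat.fib m : Int) ∧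
      (Nat.fib m : Int) ≤ r ∧ r < (Nat.fib (m + 1) : Int) := by
  intro a b
  fun_induction fibFindB with
  | case1 a b h ih =>
      intro k hk hA hB hle
      have hstep := fib_step k hk
      refine ih (k + 1) (by omega) (by rw [hB]; norm_num) (by rw [hA, hB, hstep]) ?_
      rw [← hstep, ← hA, ← hB]; exact h.2
  | case2 a b h =>
      intro k hk hA hB hle
      refine ⟨k, hk, hB, hle, ?_⟩
      have hstep := fib_step k hk
      have hbpos : 1 ≤ (Nat.fib k : Int) := by
        have := Nat.fib_pos.mpr (show 0 < k by omega)
        exact_mod_cast this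
      rw [not_and_or] at h
      subst hA hB
      omega

-- the bracketing fib m ≤ r < fib (m+1) pins down the value fib m (m, m' ≥ 2)
theorem fib_bracket_unique (r : Int) (m m' : Nat) (_hm : 2 ≤ m) (_hm' : 2 ≤ m')
    (h1 : (Nat.fib m : Int) ≤ r) (h2 : r < (Nat.fib (m + 1) : Int))
    (h3 : (Nat.fib m' : Int) ≤ r) (h4 : r < (Nat.fib (m' + 1) : Int)) :
    (Nat.fib m : Int) = (Nat.fib m' : Int) := by
  rcases lt_trichotomy m m' with h | h | h
  · have : Nat.fib (m + 1) ≤ Nat.fib m' := Nat.fib_mono (by omega)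
    have : (Nat.fib (m + 1) : Int) ≤ (Nat.fib m' : Int) := by exact_mod_cast this
    omega
  · rw [h]
  · have : Nat.fib (m' + 1) ≤ Nat.fib m := Nat.fib_mono (by omega)
    have : (Nat.fib (m' + 1) : Int) ≤ (Nat.fib m : Int) := by exact_mod_cast this
    omega

theorem findB_top (r : Int) (hr : 1 ≤ r) :
    ∃ m, 2 ≤ m ∧ fibFindB r 1 1 = (Nat.fib m : Int) ∧
      (Nat.fib m : Int) ≤ r ∧ r < (Nat.fib (m + 1) : Int) :=
  findB_spec r 1 1 2 (le_refl 2) (by simp) (by simp) (by norm_num [Nat.fib]; exact hr)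

theorem loop_eq (n : Nat) : ∀ (fuel : Nat) (r : Int), r.toNat ≤ fuel →
    ∀ (idx : Nat) (c : Int), 1 ≤ idx → idx < n → r < (Nat.fib (idx + 2) : Int) →
    loopA (FL n) r idx c = c + fibsum_alt r := by
  intro fuel
  induction fuel with
  | zero =>
      intro r hm idx c h1 h2 h3
      rw [loopA, dif_neg (fun hcon => absurd hcon.1 (by omega))]
      rw [fibsum_alt, dif_pos (by omega)]
      ring
  | succ fuel ih =>
      intro r hm idx c h1 h2 h3
      by_cases hr : 0 < r
      · obtain ⟨hj1, hj2, hj3, hj4⟩ := find_spec n r (by omega) idx h1 h2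
        set j := findIdxA (FL n) r idx with hj
        have hgd : (FL n).getD j 0 = (Nat.fib (j + 1) : Int) := FL_getD n _ (by omega)
        have hfibpos : 0 < Nat.fib (j + 1) := Nat.fib_pos.mpr (by omega)
        have hrj2 : r < (Nat.fib (j + 2) : Int) := by
          rcases Nat.lt_or_ge j idx with hlt | hge
          · exact hj4 (j + 1) (by omega) (by omega)
          · have hji : j = idx := by omega
            rw [hji]; exact h3
        -- A's step
        rw [loopA, dif_pos ⟨hr, by rw [hgd]; exact_mod_cast hfibpos⟩, ← hj, hgd]
        -- B's step: fibFindB r 1 1 = fib (j+1) by bracketing uniqueness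
        obtain ⟨m, hm2, hmeq, hmle, hmlt⟩ := findB_top r (by omega)
        have hval : fibFindB r 1 1 = (Nat.fib (j + 1) : Int) := by
          rw [hmeq]
          exact fib_bracket_unique r m (j + 1) hm2 (by omega) hmle hmlt hj3
            (by exact hrj2)
        have hrec := Nat.fib_add_two (n := j)
        have hnew : r - (Nat.fib (j + 1) : Int) < (Nat.fib (j + 2) : Int) := by
          push_cast [hrec] at hrj2 ⊢
          have : 0 ≤ (Nat.fib (j + 1) : Int) := by positivity
          omega
        rw [ih (r - (Nat.fib (j + 1) : Int)) (by omega) j (c + 1) hj1 (by omega)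
            (by push_cast [hrec] at hrj2 ⊢; omega)]
        conv_rhs => rw [fibsum_alt]
        rw [dif_neg (by omega), hval]
        ring
      · rw [loopA, dif_neg (fun hcon => absurd hcon.1 hr)]
        rw [fibsum_alt, dif_pos (by omega)]
        ring

theorem main_eq (A : Int) : fibsum A = fibsum_alt A := by
  obtain ⟨n, hn, hEq, hA⟩ := build_top A
  rw [hEq]
  have h3 : A < (Nat.fib ((n - 1) + 2) : Int) := by
    have hx : n - 1 + 2 = n + 1 := by omega
    rw [hx]; exact hA
  rw [loop_eq n A.toNat A (le_refl _) (n - 1) 0 (by omega) (by omega) h3]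
  ring

-- ===== VERDICT (by name: the statement is the Claim_ definition above) =====
theorem fibsum_spec : Claim_equal_fibsum := by
  intro A _
  exact main_eq A
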